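-- pv_equiv track=rewrite | github.com/jppf22/Fundamentos-de-Programacao | Projetos/1/Projeto.py | insere_espacos
-- ===== SOURCE A (Python) =====
-- def insere_espacos(string_clean, width):
--     '''
--     Returns a string that fits the given width
--     by adding whitespaces between each words (if there is more than 1 word)
--     or by adding whitespaces to the end of the string (otherwise).
--
--     string_clean -> str
--     width -> int
--     return -> str
--     '''
--
--     def get_whitespaces(num):
--         '''Returns a string made up of the necessary number of ' ' after a given word position'''
--         res = ' '
--         while num != 0:
--             res += ' '
--             num -= 1
--         return res
--
--     if(len(string_clean.split()) >= 2):
--        dif = width - len(string_clean)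
--        whitespaces_original = string_clean.count(' ') # amount of whitespaces on the original string
--
--        whitespaces_guaranteed = dif // whitespaces_original
--        whitespaces_left = dif % whitespaces_original
--
--        words = string_clean.split()
--        string_final = ""
--
--        for i in range(0,len(words)-1): #the last word isn't followed by a whitespace therefore we use len(words)-1
--             string_final = string_final + words[i] + get_whitespaces(whitespaces_guaranteed+(whitespaces_left > 0))
--             whitespaces_left -= 1
--
--        return string_final + words[len(words)-1]
--
--     else:
--         return string_clean.ljust(width,' ')
-- ===== SOURCE B (Python) =====
-- def insere_espacos(string_clean, width):
--     words = string_clean.split()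
--     if len(words) < 2:
--         return string_clean.ljust(width, ' ')
--     g, r = divmod(width - len(string_clean), string_clean.count(' '))
--     big = ' ' * (g + 2)
--     base = big.join(words)
--     k = len(words) - 1 - min(r, len(words) - 1)
--     return (' ' * (g + 1)).join(base.rsplit(big, k))
-- ===== Notes on version B (the rewrite author's own statement) =====
-- stated objective: alternative
-- what changed: B has no per-gap loop and no hand-built space strings: it builds a uniformly big-gap base string with str.join and then shrinks the last gaps in one str.rsplit(big, k)/join pass, so the first-r-gaps-wider rule emerges from string pattern splitting instead of A's decrementing-counter word loop with a while-based space builder; Pre_ excludes only inputs where A raises ZeroDivisionError (>=2 words, no ' ' char) or loops forever (negative per-gap space budget).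
import Mathlib
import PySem

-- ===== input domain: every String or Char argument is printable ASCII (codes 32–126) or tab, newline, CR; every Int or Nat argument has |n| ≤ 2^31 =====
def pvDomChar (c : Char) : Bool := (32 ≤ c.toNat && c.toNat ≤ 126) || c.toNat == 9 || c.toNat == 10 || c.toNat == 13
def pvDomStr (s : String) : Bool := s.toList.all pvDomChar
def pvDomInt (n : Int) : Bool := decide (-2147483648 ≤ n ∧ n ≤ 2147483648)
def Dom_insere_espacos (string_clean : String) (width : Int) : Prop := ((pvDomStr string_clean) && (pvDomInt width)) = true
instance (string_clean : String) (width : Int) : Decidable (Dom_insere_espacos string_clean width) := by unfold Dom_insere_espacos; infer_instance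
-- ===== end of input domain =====

-- B drops A's per-gap loop: it joins the words with the wide gap once and then shrinks the
-- trailing gaps in a single rsplit/join pass (alternative algorithm, same cost).

-- ===== PORT A =====

-- hand port of str.ljust(w, ' '): pads with spaces iff w > len (exact, used by both Pythons)
def pvLjust (s : List Char) (w : Int) : List Char :=
  s ++ List.replicate (w - (s.length : Int)).toNat ' '

-- the 'while num != 0: res += ' '; num -= 1' loop of get_whitespaces; Python diverges for
-- num < 0 (those inputs are excluded by Pre_), '.toNat' makes the port total there
def pvGetWhitespacesGo : Nat → List Char → List Char
  | 0, res => res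
  | n + 1, res => pvGetWhitespacesGo n (res ++ [' '])

def pvGetWhitespaces (num : Int) : List Char :=
  pvGetWhitespacesGo num.toNat [' ']

def insere_espacos (string_clean : String) (width : Int) : String :=
  let s := string_clean.toList
  if 2 ≤ (PySem.Chars.split₀ s).length then
    let dif : Int := width - (s.length : Int)
    let wsO : Int := (PySem.Chars.count s [' '] : Int)
    let g := PySem.Int.floordiv dif wsO
    let words := PySem.Chars.split₀ s
    -- for i in range(0, len(words)-1): state = (string_final, whitespaces_left); indices are in range
    let st := (PySem.List.pyRange 0 ((words.length : Int) - 1) 1).foldl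
      (fun (st : List Char × Int) i =>
        (st.1 ++ PySem.List.pyGetD words i [] ++
           pvGetWhitespaces (g + (if 0 < st.2 then 1 else 0)), st.2 - 1))
      ([], PySem.Int.mod dif wsO)
    String.ofList (st.1 ++ PySem.List.pyGetD words ((words.length : Int) - 1) [])
  else
    String.ofList (pvLjust s width)

-- ===== PORT B =====

-- hand port of str.rsplit(sep, maxsplit) for a NONEMPTY sep and maxsplit ≥ 0 (what Source B calls:
-- its sep is ' '*(g+2) with g ≥ -1 on Pre_): repeatedly split at the rightmost occurrence of sep.
-- pvMatchAt s sep i: 'sep occurs in s at position i' (exact).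
def pvMatchAt (s sep : List Char) (i : Nat) : Bool := (s.drop i).take sep.length == sep

-- rightmost occurrence of sep in s (exact = str.rfind for nonempty sep; none = not found)
def pvRfind (s sep : List Char) : Option Nat :=
  (List.range (s.length + 1)).foldl (fun acc i => if pvMatchAt s sep i then some i else acc) none

def pvRsplit (s sep : List Char) : Nat → List (List Char)
  | 0 => [s]
  | k + 1 =>
    match pvRfind s sep with
    | none => [s]
    | some i => pvRsplit (s.take i) sep k ++ [s.drop (i + sep.length)]

def insere_espacos_alt (string_clean : String) (width : Int) : String :=
  let s := string_clean.toList
  let words := PySem.Chars.split₀ s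
  if words.length < 2 then
    String.ofList (pvLjust s width)
  else
    let dif : Int := width - (s.length : Int)
    let wsO : Int := (PySem.Chars.count s [' '] : Int)
    let g := PySem.Int.floordiv dif wsO
    let r := PySem.Int.mod dif wsO
    let big := PySem.List.pyRepeat [' '] (g + 2)
    let base := PySem.Chars.join big words
    -- k = len(words) - 1 - min(r, len(words) - 1); k ≥ 0 on Pre_ (r = dif % ws ≥ 0), so '.toNat' is exact
    let k : Int := ((words.length : Int) - 1) - min r ((words.length : Int) - 1)
    String.ofList (PySem.Chars.join (PySem.List.pyRepeat [' '] (g + 1)) (pvRsplit base big k.toNat))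

-- ===== PRECONDITION & SPEC =====
-- Pre_ excludes exactly the inputs where the Python A does not return: ≥2 words with no ' '
-- character (ZeroDivisionError), and ≥2 words with a negative per-gap space budget, i.e.
-- dif//ws ≤ -2, or dif//ws = -1 with fewer leftover spaces than gaps (get_whitespaces loops forever).
def Pre_insere_espacos (string_clean : String) (width : Int) : Prop :=
  (PySem.Chars.split₀ string_clean.toList).length < 2 ∨
    (0 < PySem.Chars.count string_clean.toList [' '] ∧
      (0 ≤ PySem.Int.floordiv (width - (string_clean.toList.length : Int))
             (PySem.Chars.count string_clean.toList [' '] : Int) ∨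
       (PySem.Int.floordiv (width - (string_clean.toList.length : Int))
             (PySem.Chars.count string_clean.toList [' '] : Int) = -1 ∧
        ((PySem.Chars.split₀ string_clean.toList).length : Int) - 1 ≤
          PySem.Int.mod (width - (string_clean.toList.length : Int))
             (PySem.Chars.count string_clean.toList [' '] : Int))))
instance (string_clean : String) (width : Int) : Decidable (Pre_insere_espacos string_clean width) := by
  unfold Pre_insere_espacos; infer_instance

def pvWitness_insere_espacos : String × Int := ("ab cd e", 11)

def Spec_insere_espacos (string_clean : String) (width : Int) (out : String) : Prop :=
  out = insere_espacos_alt string_clean width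
instance (string_clean : String) (width : Int) (out : String) : Decidable (Spec_insere_espacos string_clean width out) := by
  unfold Spec_insere_espacos; infer_instance

-- ===== CLAIM (what is proved, stated in full; the proofs are below) =====
def Claim_equal_insere_espacos : Prop := ∀ (string_clean : String) (width : Int), Dom_insere_espacos string_clean width → Pre_insere_espacos string_clean width → Spec_insere_espacos string_clean width (insere_espacos string_clean width)

-- ===== LEMMAS AND PROOFS =====

-- canonical "words with separators after all but the implicit last word": the first gaps while
-- 0 < left get `big`, the rest get `small`
def pvSeps (big small : List Char) : Int → List (List Char) → List Char
  | _, [] => []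
  | left, w :: ws => w ++ (if 0 < left then big else small) ++ pvSeps big small (left - 1) ws

theorem pvGetWhitespacesGo_eq (n : Nat) : ∀ res, pvGetWhitespacesGo n res = res ++ List.replicate n ' ' := by
  induction n with
  | zero => simp [pvGetWhitespacesGo]
  | succ k ih =>
    intro res
    simp [pvGetWhitespacesGo, ih, List.replicate_succ]

theorem pvGetWhitespaces_eq (num : Int) :
    pvGetWhitespaces num = List.replicate (num.toNat + 1) ' ' := by
  simp [pvGetWhitespaces, pvGetWhitespacesGo_eq, List.replicate_succ]

theorem pvLoopA (g : Int) (ws : List (List Char)) : ∀ (acc : List Char) (left : Int),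
    (0 ≤ g ∨ (g = -1 ∧ (ws.length : Int) ≤ left)) →
    (ws.foldl (fun (st : List Char × Int) w =>
        (st.1 ++ w ++ pvGetWhitespaces (g + (if 0 < st.2 then 1 else 0)), st.2 - 1)) (acc, left)).1
      = acc ++ pvSeps (List.replicate (g + 2).toNat ' ') (List.replicate (g + 1).toNat ' ') left ws := by
  induction ws with
  | nil => intro acc left _; simp [pvSeps]
  | cons w rest ih =>
    intro acc left h
    have hg1 : -1 ≤ g := by rcases h with h | ⟨h, _⟩ <;> omega
    simp only [List.foldl_cons, pvSeps]
    by_cases hl : 0 < left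
    · have hgw : pvGetWhitespaces (g + 1) = List.replicate (g + 2).toNat ' ' := by
        rw [pvGetWhitespaces_eq]; congr 1; omega
      have h' : 0 ≤ g ∨ (g = -1 ∧ (rest.length : Int) ≤ left - 1) := by
        rcases h with h | ⟨h1, h2⟩
        · exact Or.inl h
        · right; refine ⟨h1, ?_⟩; simp at h2; omega
      rw [if_pos hl, if_pos hl, ih _ _ h', hgw]
      simp
    · have hg0 : 0 ≤ g := by
        rcases h with h | ⟨_, h2⟩
        · exact h
        · exfalso; simp at h2; omega
      have hgw : pvGetWhitespaces (g + 0) = List.replicate (g + 1).toNat ' ' := by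
        rw [pvGetWhitespaces_eq]; congr 1; omega
      have h' : 0 ≤ g ∨ (g = -1 ∧ (rest.length : Int) ≤ left - 1) := Or.inl hg0
      rw [if_neg hl, if_neg hl, ih _ _ h', hgw]
      simp

theorem pvFoldlSmall (small : List Char) (l : List (List Char)) : ∀ acc,
    l.foldl (fun a w => a ++ small ++ w) acc = acc ++ l.flatMap (fun w => small ++ w) := by
  induction l with
  | nil => simp
  | cons w rest ih => intro acc; simp [List.flatMap_def]

theorem pvSepsSmall (big small : List Char) (ys : List (List Char)) : ∀ (left : Int), left ≤ 0 →
    ∀ last, small ++ (pvSeps big small left ys ++ last) = (ys ++ [last]).flatMap (fun w => small ++ w) := by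
  induction ys with
  | nil => intro left _ last; simp [pvSeps]
  | cons w rest ih =>
    intro left hl last
    have hnl : ¬ 0 < left := by omega
    simp only [pvSeps, if_neg hnl]
    have := ih (left - 1) (by omega) last
    simp only [List.cons_append, List.flatMap_cons]
    simp only [List.append_assoc] at this ⊢
    rw [← this]

theorem pvSepsB (big small : List Char) (ys : List (List Char)) : ∀ (last : List Char) (left : Int), 0 ≤ left →
    pvSeps big small left ys ++ last =
      PySem.Chars.join big (List.take (min left.toNat ys.length + 1) (ys ++ [last])) ++
        (List.drop (min left.toNat ys.length + 1) (ys ++ [last])).foldl (fun acc w => acc ++ small ++ w) [] := by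
  induction ys with
  | nil =>
    intro last left _
    simp [pvSeps, PySem.Chars.join_singleton]
  | cons w rest ih =>
    intro last left hl
    by_cases h0 : 0 < left
    · -- first gap gets `big`; peel one word off the take
      have hmin : min left.toNat (rest.length + 1) + 1 = (min (left - 1).toNat rest.length + 1) + 1 := by
        omega
      simp only [List.length_cons, hmin, List.cons_append, List.take_succ_cons, List.drop_succ_cons]
      have htne : List.take (min (left - 1).toNat rest.length + 1) (rest ++ [last]) ≠ [] := by
        have : rest ++ [last] ≠ [] := by simp
        intro hcon
        rcases List.take_eq_nil_iff.mp hcon with h | h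
        · omega
        · exact this h
      obtain ⟨a, t, ht⟩ := List.exists_cons_of_ne_nil htne
      have hjoin : PySem.Chars.join big (w :: List.take (min (left - 1).toNat rest.length + 1) (rest ++ [last]))
          = w ++ big ++ PySem.Chars.join big (List.take (min (left - 1).toNat rest.length + 1) (rest ++ [last])) := by
        rw [ht, PySem.Chars.join_cons_cons]
      rw [hjoin]
      have := ih last (left - 1) (by omega)
      simp only [pvSeps, if_pos h0]
      simp only [List.append_assoc] at this ⊢
      rw [this]
    · -- left = 0: the word itself is the whole `take`, every later word is small-prefixed
      have hleft : left = 0 := by omega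
      subst hleft
      simp only [Int.toNat_zero, Nat.zero_min, Nat.zero_add, List.cons_append,
        List.take_succ_cons, List.take_zero, List.drop_succ_cons, List.drop_zero]
      simp only [pvSeps, if_neg (by omega : ¬ (0:Int) < 0)]
      rw [pvFoldlSmall, PySem.Chars.join_singleton]
      have := pvSepsSmall big small rest (-1) (by omega) last
      simp only [List.append_assoc] at this ⊢
      simp only [List.nil_append]
      rw [← this]
      norm_num

-- every word that split₀ produces is nonempty and whitespace-free
theorem pvSplitGoWords (s : List Char) : ∀ (cur : List Char) (acc : List (List Char)),
    (∀ c ∈ cur, PySem.Chars.isspace c = false) →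
    (∀ w ∈ acc, w ≠ [] ∧ ∀ c ∈ w, PySem.Chars.isspace c = false) →
    ∀ w ∈ PySem.Chars.split₀.go s cur acc, w ≠ [] ∧ ∀ c ∈ w, PySem.Chars.isspace c = false := by
  induction s with
  | nil =>
    intro cur acc hcur hacc w hw
    by_cases hc : cur.isEmpty
    · rw [PySem.Chars.split₀.go, if_pos hc] at hw
      exact hacc w (by simpa using hw)
    · rw [PySem.Chars.split₀.go, if_neg hc] at hw
      simp only [List.mem_reverse, List.mem_cons] at hw
      rcases hw with hw | hw
      · subst hw
        constructor
        · simp only [ne_eq, List.reverse_eq_nil_iff]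
          intro hnil; rw [hnil] at hc; simp at hc
        · intro c hc'; exact hcur c (by simpa using hc')
      · exact hacc w hw
  | cons c rest ih =>
    intro cur acc hcur hacc w hw
    by_cases hsp : PySem.Chars.isspace c
    · by_cases hc : cur.isEmpty
      · rw [PySem.Chars.split₀.go, if_pos hsp, if_pos hc] at hw
        exact ih [] acc (by simp) hacc w hw
      · rw [PySem.Chars.split₀.go, if_pos hsp, if_neg hc] at hw
        refine ih [] (cur.reverse :: acc) (by simp) ?_ w hw
        intro w' hw'
        rcases List.mem_cons.mp hw' with hw' | hw'
        · subst hw'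
          constructor
          · simp only [ne_eq, List.reverse_eq_nil_iff]
            intro hnil; rw [hnil] at hc; simp at hc
          · intro c' hc'; exact hcur c' (by simpa using hc')
        · exact hacc w' hw'
    · rw [PySem.Chars.split₀.go, if_neg hsp] at hw
      refine ih (c :: cur) acc ?_ hacc w hw
      intro c' hc'
      rcases List.mem_cons.mp hc' with hc' | hc'
      · subst hc'; simpa using hsp
      · exact hcur c' hc'

theorem pvSplitWords (s : List Char) :
    ∀ w ∈ PySem.Chars.split₀ s, w ≠ [] ∧ ∀ c ∈ w, c ≠ ' ' := by
  intro w hw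
  have := pvSplitGoWords s [] [] (by simp) (by simp) w hw
  refine ⟨this.1, ?_⟩
  intro c hc hsp
  have h2 := this.2 c hc
  rw [hsp] at h2
  simp [PySem.Chars.isspace] at h2

-- joining with a separator: peeling the last word off
theorem pvJoinLast (big : List Char) (ys : List (List Char)) (hys : ys ≠ []) (w : List Char) :
    PySem.Chars.join big (ys ++ [w]) = PySem.Chars.join big ys ++ big ++ w := by
  induction ys with
  | nil => exact absurd rfl hys
  | cons a rest ih =>
    rcases rest with _ | ⟨b, rest'⟩
    · simp [PySem.Chars.join_cons_cons, PySem.Chars.join_singleton]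
    · have ih' := ih (by simp)
      simp only [List.cons_append] at ih' ⊢
      rw [PySem.Chars.join_cons_cons, ih', PySem.Chars.join_cons_cons]
      simp [List.append_assoc]

-- the rsplit scanner: a run of list elements none of which matches leaves the accumulator alone
theorem pvFoldlNoMatch (s sep : List Char) (l : List Nat) : ∀ (acc : Option Nat),
    (∀ j ∈ l, pvMatchAt s sep j = false) →
    l.foldl (fun acc i => if pvMatchAt s sep i then some i else acc) acc = acc := by
  induction l with
  | nil => intro acc _; simp
  | cons j rest ih =>
    intro acc h
    simp only [List.foldl_cons, h j (by simp)]
    exact ih acc (fun j' hj' => h j' (by simp [hj']))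

theorem pvRfindSpec (s sep : List Char) (i0 : Nat) (h0 : i0 ≤ s.length)
    (hm : pvMatchAt s sep i0 = true) (hn : ∀ j, i0 < j → pvMatchAt s sep j = false) :
    pvRfind s sep = some i0 := by
  unfold pvRfind
  have hsplit : s.length + 1 = (i0 + 1) + (s.length - i0) := by omega
  rw [hsplit, List.range_add, List.foldl_append, List.range_succ, List.foldl_append]
  simp only [List.foldl_cons, List.foldl_nil, hm, if_pos]
  exact pvFoldlNoMatch s sep _ _ (by
    intro j hj
    simp only [List.mem_map] at hj
    obtain ⟨x, _, rfl⟩ := hj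
    exact hn _ (by omega))

theorem pvMatchAtSelf (t sep w : List Char) :
    pvMatchAt (t ++ sep ++ w) sep t.length = true := by
  unfold pvMatchAt
  rw [List.append_assoc, List.drop_left, List.take_left]
  simp

theorem pvNoMatchBeyond (t sep w : List Char) (hb : sep ≠ [])
    (hbs : ∀ c ∈ sep, c = ' ') (hw : ∀ c ∈ w, c ≠ ' ') :
    ∀ j, t.length < j → pvMatchAt (t ++ sep ++ w) sep j = false := by
  intro j hj
  by_contra hcon
  rw [Bool.not_eq_false] at hcon
  unfold pvMatchAt at hcon
  rw [beq_iff_eq] at hcon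
  have hL : 1 ≤ sep.length := by
    rcases sep with _ | _
    · exact absurd rfl hb
    · simp
  have hlen := congrArg List.length hcon
  simp only [List.length_take, List.length_drop] at hlen
  have hsl : (t ++ sep ++ w).length = t.length + sep.length + w.length := by
    simp only [List.length_append]
  have hle : sep.length ≤ (t ++ sep ++ w).length - j := by omega
  have hq : j + (sep.length - 1) < (t ++ sep ++ w).length := by omega
  have hq2 : sep.length - 1 < (((t ++ sep ++ w).drop j).take sep.length).length := by
    simp only [List.length_take, List.length_drop]; omega
  have hchar : (((t ++ sep ++ w).drop j).take sep.length)[sep.length - 1]'hq2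
      = sep[sep.length - 1]'(by omega) := List.getElem_of_eq hcon hq2
  rw [List.getElem_take, List.getElem_drop] at hchar
  have hwidx : j + (sep.length - 1) - (t ++ sep).length < w.length := by
    simp only [List.length_append]; omega
  have hwchar : (t ++ sep ++ w)[j + (sep.length - 1)]'hq
      = w[j + (sep.length - 1) - (t ++ sep).length]'hwidx :=
    List.getElem_append_right (by simp only [List.length_append]; omega)
  exact (hw _ (List.getElem_mem _))
    (hwchar.symm.trans (hchar.trans (hbs _ (List.getElem_mem _))))

-- rsplit on a big-joined word list = keep the first (n-k) words joined, split off the last k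
theorem pvRsplitJoin (big : List Char) (hb : big ≠ []) (hbs : ∀ c ∈ big, c = ' ') :
    ∀ (k : Nat) (ws : List (List Char)), (∀ w ∈ ws, w ≠ [] ∧ ∀ c ∈ w, c ≠ ' ') →
    k + 1 ≤ ws.length →
    pvRsplit (PySem.Chars.join big ws) big k
      = PySem.Chars.join big (ws.take (ws.length - k)) :: ws.drop (ws.length - k) := by
  intro k
  induction k with
  | zero =>
    intro ws _ _
    simp [pvRsplit]
  | succ k ih =>
    intro ws hws hk
    have hne : ws ≠ [] := by intro h; rw [h] at hk; simp at hk
    set ys := ws.dropLast with hys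
    set w := ws.getLast hne with hw
    have hsplit : ys ++ [w] = ws := List.dropLast_append_getLast hne
    have hyslen : ys.length = ws.length - 1 := by simp [hys]
    have hysne : ys ≠ [] := by
      intro h
      have : ys.length = 0 := by rw [h]; rfl
      omega
    have hwprops : ∀ w' ∈ ys, w' ≠ [] ∧ ∀ c ∈ w', c ≠ ' ' := by
      intro w' hw'
      exact hws w' (by rw [← hsplit]; exact List.mem_append_left _ hw')
    have hwmem : w ∈ ws := List.getLast_mem hne
    have hjoin : PySem.Chars.join big ws = PySem.Chars.join big ys ++ big ++ w := by
      rw [← hsplit]; exact pvJoinLast big ys hysne w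
    have hfind : pvRfind (PySem.Chars.join big ws) big = some (PySem.Chars.join big ys).length := by
      rw [hjoin]
      exact pvRfindSpec _ _ _ (by simp only [List.length_append]; omega)
        (pvMatchAtSelf _ _ _)
        (pvNoMatchBeyond _ _ _ hb hbs (hws w hwmem).2)
    have htake : (PySem.Chars.join big ws).take (PySem.Chars.join big ys).length
        = PySem.Chars.join big ys := by
      rw [hjoin, List.append_assoc]; exact List.take_left
    have hdrop : (PySem.Chars.join big ws).drop ((PySem.Chars.join big ys).length + big.length)
        = w := by
      have : PySem.Chars.join big ws = (PySem.Chars.join big ys ++ big) ++ w := by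
        rw [hjoin]
      rw [this]
      have hl : (PySem.Chars.join big ys ++ big).length
          = (PySem.Chars.join big ys).length + big.length := by simp
      rw [← hl]
      exact List.drop_left
    rw [pvRsplit, hfind]
    dsimp only
    rw [htake, hdrop]
    have hkys : k + 1 ≤ ys.length := by omega
    rw [ih ys hwprops hkys]
    have hn : ws.length - (k + 1) = ys.length - k := by omega
    have hnle : ys.length - k ≤ ys.length := by omega
    rw [hn, ← hsplit,
      List.take_append_of_le_length hnle, List.drop_append_of_le_length hnle]
    simp

-- joining with the small separator = the head plus small-prefixed tail words
theorem pvJoinSmall (small : List Char) (rest : List (List Char)) : ∀ (x : List Char),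
    PySem.Chars.join small (x :: rest) = x ++ rest.flatMap (fun w => small ++ w) := by
  induction rest with
  | nil => intro x; simp [PySem.Chars.join_singleton]
  | cons b rest' ih =>
    intro x
    rw [PySem.Chars.join_cons_cons, ih b]
    simp [List.append_assoc]

-- ===== VERDICT (by name: the statement is the Claim_ definition above) =====
theorem insere_espacos_spec : Claim_equal_insere_espacos := by
  intro string_clean width _ hpre
  unfold Pre_insere_espacos at hpre
  unfold Spec_insere_espacos insere_espacos insere_espacos_alt
  dsimp only
  set s := string_clean.toList with hs
  set words := PySem.Chars.split₀ s with hwords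
  by_cases hlen : words.length < 2
  · rw [if_neg (by omega), if_pos hlen]
  · rw [if_pos (by omega), if_neg hlen]
    have hn2 : 2 ≤ words.length := by omega
    rcases hpre with h | ⟨hws, hg⟩
    · exact absurd h hlen
    set dif : Int := width - (s.length : Int) with hdif
    set wsO : Int := (PySem.Chars.count s [' '] : Int) with hwsO
    have hwsO0 : 0 < wsO := by rw [hwsO]; exact_mod_cast hws
    set g := PySem.Int.floordiv dif wsO with hgdef
    set r := PySem.Int.mod dif wsO with hrdef
    have hr0 : 0 ≤ r := PySem.Int.mod_nonneg dif hwsO0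
    -- decompose words = ys ++ [last]
    have hne : words ≠ [] := by intro h; rw [h] at hn2; simp at hn2
    set ys := words.dropLast with hys
    set last := words.getLast hne with hlast
    have hsplit : ys ++ [last] = words := List.dropLast_append_getLast hne
    have hyslen : ys.length = words.length - 1 := by simp [hys]
    -- the trailing words[len-1] is `last`
    have hlastget : PySem.List.pyGetD words ((words.length : Int) - 1) [] = last := by
      rw [PySem.List.pyGetD_eq_getElem words [] (by omega) (by omega)]
      rw [hlast, List.getLast_eq_getElem]
      congr 1
      omega
    -- the index fold is the structural fold over ys
    have hbound : (words.length : Int) - 1 = (ys.length : Int) := by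
      rw [hyslen]; omega
    have hcongr : ∀ (st : List Char × Int), ∀ i ∈ PySem.List.pyRange 0 ((ys.length : Int)) 1,
        (st.1 ++ PySem.List.pyGetD words i [] ++
           pvGetWhitespaces (g + (if 0 < st.2 then 1 else 0)), st.2 - 1)
        = (st.1 ++ PySem.List.pyGetD ys i [] ++
           pvGetWhitespaces (g + (if 0 < st.2 then 1 else 0)), st.2 - 1) := by
      intro st i hi
      rw [PySem.List.mem_pyRange_one] at hi
      have hiys : i < (ys.length : Int) := hi.2
      have hiw : i < (words.length : Int) := by rw [hyslen] at hiys; omega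
      have hi1 : PySem.List.pyGetD words i [] = PySem.List.pyGetD ys i [] := by
        rw [PySem.List.pyGetD_eq_getElem words [] (by omega) hiw,
            PySem.List.pyGetD_eq_getElem ys [] (by omega) hiys]
        exact (List.getElem_dropLast _).symm
      rw [hi1]
    have hfold :
        ((PySem.List.pyRange 0 ((words.length : Int) - 1) 1).foldl
          (fun (st : List Char × Int) i =>
            (st.1 ++ PySem.List.pyGetD words i [] ++
               pvGetWhitespaces (g + (if 0 < st.2 then 1 else 0)), st.2 - 1))
          ([], r)).1
        = (ys.foldl (fun (st : List Char × Int) w =>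
            (st.1 ++ w ++ pvGetWhitespaces (g + (if 0 < st.2 then 1 else 0)), st.2 - 1))
            ([], r)).1 := by
      rw [hbound, PySem.List.foldl_congr_mem _ _ _ _ hcongr,
        PySem.List.foldl_pyRange_zero_pyGetD' ys []
          (fun (st : List Char × Int) w =>
            (st.1 ++ w ++ pvGetWhitespaces (g + (if 0 < st.2 then 1 else 0)), st.2 - 1)) ([], r)]
    rw [hfold, hlastget]
    -- A side → pvSeps
    have hloopHyp : 0 ≤ g ∨ (g = -1 ∧ (ys.length : Int) ≤ r) := by
      rcases hg with h | ⟨h1, h2⟩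
      · exact Or.inl h
      · right; refine ⟨h1, ?_⟩; rw [hyslen]; omega
    rw [pvLoopA g ys [] r hloopHyp]
    have hgm1 : -1 ≤ g := by rcases hloopHyp with h | ⟨h, _⟩ <;> omega
    -- B side: rsplit of the big-joined words, then the small join
    set m := min r ((words.length : Int) - 1) with hm
    have hm0 : 0 ≤ m := by
      rw [hm]; exact le_min hr0 (by omega)
    have hmlt : m ≤ (words.length : Int) - 1 := min_le_right _ _
    set k : Int := ((words.length : Int) - 1) - m with hk
    rw [PySem.List.pyRepeat_singleton, PySem.List.pyRepeat_singleton]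
    have hbigne : List.replicate (g + 2).toNat ' ' ≠ [] := by
      have : (g + 2).toNat ≠ 0 := by omega
      simp [List.replicate_eq_nil_iff, this]
    have hbigsp : ∀ c ∈ List.replicate (g + 2).toNat ' ', c = ' ' := by
      intro c hc; exact (List.eq_of_mem_replicate hc)
    have hwprops : ∀ w ∈ words, w ≠ [] ∧ ∀ c ∈ w, c ≠ ' ' := by
      rw [hwords]; exact pvSplitWords s
    have hkb : k.toNat + 1 ≤ words.length := by omega
    rw [pvRsplitJoin _ hbigne hbigsp k.toNat words hwprops hkb]
    have hnk : words.length - k.toNat = m.toNat + 1 := by omega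
    rw [hnk, pvJoinSmall]
    -- A side → the same take/drop form via pvSepsB
    simp only [List.nil_append]
    rw [pvSepsB _ _ ys last r hr0]
    rw [hsplit]
    have hminm : min r.toNat ys.length + 1 = m.toNat + 1 := by
      rw [hyslen]; omega
    rw [hminm, pvFoldlSmall]
    simp
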